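-- pv_equiv track=rewrite | github.com/SimonFV/hamming_code | hamming.py | clear_places
-- ===== SOURCE A (Python) =====
-- import copy
--
-- def is_power_of_two(n):
--     return (n != 0) and (n & (n - 1) == 0)
--
-- def clear_places(extended_data):
--     clear_data = copy.deepcopy(extended_data)
--     i = 1
--     while i < len(clear_data):
--         if is_power_of_two(i):
--             clear_data[i - 1] = -1
--         i += 1
--     return clear_data
-- ===== SOURCE B (Python) =====
-- import copy
--
-- def clear_places(extended_data):
--     clear_data = copy.deepcopy(extended_data)
--     j = 1
--     while j < len(clear_data):
--         clear_data[j - 1] = -1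
--         j *= 2
--     return clear_data
-- ===== Notes on version B (the rewrite author's own statement) =====
-- stated objective: simpler
-- what changed: Instead of scanning every index and testing each with the bitwise is_power_of_two helper, B jumps directly through the power-of-two positions by doubling a counter, so the helper disappears and the loop runs O(log n) iterations after the copy.
import Mathlib
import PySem

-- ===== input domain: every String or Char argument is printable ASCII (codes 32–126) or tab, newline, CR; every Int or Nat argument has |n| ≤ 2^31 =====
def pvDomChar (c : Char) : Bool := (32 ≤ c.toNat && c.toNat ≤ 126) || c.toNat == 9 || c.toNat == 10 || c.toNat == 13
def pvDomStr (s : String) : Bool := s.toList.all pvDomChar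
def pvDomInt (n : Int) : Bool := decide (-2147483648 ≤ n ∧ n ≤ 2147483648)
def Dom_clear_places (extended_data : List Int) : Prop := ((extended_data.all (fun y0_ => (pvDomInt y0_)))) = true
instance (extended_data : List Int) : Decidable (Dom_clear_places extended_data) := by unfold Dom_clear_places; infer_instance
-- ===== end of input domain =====

-- B marks the power-of-two positions directly by a doubling counter instead of A's
-- scan of every index with a bitwise power-of-two test; simpler, no helper needed.

-- ===== PORT A =====
-- port of is_power_of_two (i is a nonnegative loop counter, so Nat's &&& is exact here)
def is_power_of_two (n : Nat) : Bool := (decide (n ≠ 0)) && (decide (n &&& (n - 1) = 0))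

-- the while loop of A: i scans every index, length is re-read each iteration
def clearLoopA (l : List Int) (i : Nat) : List Int :=
  if _h : i < l.length then
    clearLoopA (if is_power_of_two i then l.set (i - 1) (-1) else l) (i + 1)
  else l
termination_by l.length - i
decreasing_by split <;> (try simp only [List.length_set]) <;> omega

def clear_places (extended_data : List Int) : List Int :=
  clearLoopA extended_data 1

-- ===== PORT B =====
-- the while loop of B: j doubles each iteration (j stays positive, needed for termination)
def clearLoopB (l : List Int) (j : Nat) (hj : 0 < j) : List Int :=
  if _h : j < l.length then
    clearLoopB (l.set (j - 1) (-1)) (2 * j) (by omega)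
  else l
termination_by l.length - j
decreasing_by simp [List.length_set]; omega

def clear_places_alt (extended_data : List Int) : List Int :=
  clearLoopB extended_data 1 (by omega)

-- ===== PRECONDITION & SPEC =====
def Spec_clear_places (extended_data : List Int) (out : List Int) : Prop := out = clear_places_alt extended_data
instance (extended_data : List Int) (out : List Int) : Decidable (Spec_clear_places extended_data out) := by unfold Spec_clear_places; infer_instance

-- ===== CLAIM (what is proved, stated in full; the proofs are below) =====
def Claim_equal_clear_places : Prop := ∀ (extended_data : List Int), Dom_clear_places extended_data → Spec_clear_places extended_data (clear_places extended_data)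

-- ===== LEMMAS AND PROOFS =====

-- the bitwise test of A recognises exactly the powers of two
theorem pow2_land (n : Nat) (hn : 0 < n) : (n &&& (n - 1) = 0) ↔ ∃ e, n = 2 ^ e := by
  induction n using Nat.strong_induction_on with
  | _ n ih =>
  rcases Nat.even_or_odd n with ⟨m, hm⟩ | ⟨m, hm⟩
  · -- n = 2 * m, m > 0
    have hm0 : 0 < m := by omega
    have h1 : n = Nat.bit false m := by simp [Nat.bit]; omega
    have h2 : n - 1 = Nat.bit true (m - 1) := by simp [Nat.bit]; omega
    rw [h2, h1, Nat.land_bit]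
    have ihm := ih m (by omega) hm0
    constructor
    · rintro h
      have : m &&& (m - 1) = 0 := by
        simp [Nat.bit] at h; omega
      obtain ⟨e, he⟩ := ihm.mp this
      exact ⟨e + 1, by rw [pow_succ]; omega⟩
    · rintro ⟨e, he⟩
      have he1 : 1 ≤ e := by
        rcases Nat.eq_zero_or_pos e with h | h
        · subst h; omega
        · exact h
      have : m = 2 ^ (e - 1) := by
        have : 2 ^ e = 2 * 2 ^ (e - 1) := by
          conv_lhs => rw [show e = (e - 1) + 1 by omega]
          rw [pow_succ]; ring
        omega
      have : m &&& (m - 1) = 0 := ihm.mpr ⟨e - 1, this⟩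
      simp [Nat.bit, this]
  · -- n = 2 * m + 1, odd
    rcases Nat.eq_zero_or_pos m with hm0 | hm0
    · subst hm0; subst hm
      simp
      exact ⟨0, rfl⟩
    · have h1 : n = Nat.bit true m := by simp [Nat.bit]; omega
      have h2 : n - 1 = Nat.bit false m := by simp [Nat.bit]; omega
      rw [h2, h1, Nat.land_bit]
      constructor
      · intro h
        simp [Nat.bit, Nat.and_self] at h
        omega
      · rintro ⟨e, he⟩
        rcases Nat.eq_zero_or_pos e with h | h
        · subst h; omega
        · exfalso
          have hdvd : 2 ∣ n := by rw [h1, he]; exact dvd_pow_self 2 (by omega)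
          omega

theorem is_power_of_two_iff (n : Nat) : is_power_of_two n = true ↔ ∃ e, n = 2 ^ e := by
  unfold is_power_of_two
  rcases Nat.eq_zero_or_pos n with h | h
  · subst h
    simp
    intro e he
    have := Nat.two_pow_pos e
    omega
  · simp [Nat.pos_iff_ne_zero.mp h, pow2_land n h]

-- a power of two in [2^m, 2^(m+1)) is exactly 2^m
theorem pow2_interval {e m : Nat} (h1 : 2 ^ m ≤ 2 ^ e) (h2 : 2 ^ e < 2 ^ (m + 1)) : e = m := by
  have hm : m ≤ e := (Nat.pow_le_pow_iff_right (by omega)).mp h1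
  have he : e < m + 1 := (Nat.pow_lt_pow_iff_right (by omega)).mp h2
  omega

-- pointwise description of A's loop
theorem clearLoopA_get : ∀ (d : Nat) (l : List Int) (i k : Nat), d = l.length - i → 1 ≤ i →
    (clearLoopA l i)[k]? =
      if is_power_of_two (k + 1) ∧ i ≤ k + 1 ∧ k + 1 < l.length then some (-1) else l[k]? := by
  intro d
  induction d using Nat.strong_induction_on with
  | _ d ih =>
  intro l i k hd hi
  rw [clearLoopA]
  split
  · rename_i hlt
    set l' : List Int := if is_power_of_two i then l.set (i - 1) (-1) else l with hl'
    have hlen : l'.length = l.length := by rw [hl']; split <;> simp [List.length_set]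
    have hrec := ih (l'.length - (i + 1)) (by omega) l' (i + 1) k rfl (by omega)
    rw [hrec, hlen]
    have hget : l'[k]? = if is_power_of_two i ∧ k = i - 1 then some (-1) else l[k]? := by
      rw [hl']
      split
      · rename_i hp
        rw [List.getElem?_set]
        by_cases hk : i - 1 = k
        · rw [if_pos hk, if_pos (by omega), if_pos ⟨hp, hk.symm⟩]
        · rw [if_neg hk, if_neg (fun hc => hk hc.2.symm)]
      · rename_i hp
        rw [if_neg (fun hc => hp hc.1)]
    rw [hget]
    split_ifs with h1 h2 h3 h4 h5
    · rfl
    · exact absurd ⟨h1.1, by omega, h1.2.2⟩ h2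
    · rfl
    · exfalso
      have hk1 : k + 1 = i := by omega
      exact h4 ⟨hk1 ▸ h3.1, by omega, by omega⟩
    · exfalso
      have hni : ¬ (i + 1 ≤ k + 1) := fun hA => h1 ⟨h5.1, hA, h5.2.2⟩
      have hk1 : k + 1 = i := by omega
      exact h3 ⟨hk1 ▸ h5.1, by omega⟩
    · rfl
  · rename_i hlt
    split
    · rename_i hc; omega
    · rfl

theorem clearLoopB_get : ∀ (d : Nat) (l : List Int) (m k : Nat) (hj : 0 < 2 ^ m), d = l.length - 2 ^ m →
    (clearLoopB l (2 ^ m) hj)[k]? =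
      if is_power_of_two (k + 1) ∧ 2 ^ m ≤ k + 1 ∧ k + 1 < l.length then some (-1) else l[k]? := by
  intro d
  induction d using Nat.strong_induction_on with
  | _ d ih =>
  intro l m k hj hd
  rw [clearLoopB]
  split
  · rename_i hlt
    set l' : List Int := l.set (2 ^ m - 1) (-1) with hl'
    have hlen : l'.length = l.length := by simp [hl', List.length_set]
    have h2 : 2 * 2 ^ m = 2 ^ (m + 1) := by rw [pow_succ]; ring
    have hrec := ih (l'.length - 2 ^ (m + 1)) (by simp only [hlen]; omega) l' (m + 1) k (by positivity) rfl
    have hcast : clearLoopB l' (2 * 2 ^ m) (by omega) = clearLoopB l' (2 ^ (m + 1)) (by positivity) := by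
      congr 1
    rw [hcast, hrec, hlen]
    have hget : l'[k]? = if k = 2 ^ m - 1 then some (-1) else l[k]? := by
      rw [hl', List.getElem?_set]
      by_cases hk : 2 ^ m - 1 = k
      · rw [if_pos hk, if_pos (by omega), if_pos hk.symm]
      · rw [if_neg hk, if_neg (fun hc => hk hc.symm)]
    rw [hget]
    have hmm : 2 ^ m ≤ 2 ^ (m + 1) := Nat.pow_le_pow_right (by omega) (by omega)
    split_ifs with h1 h2' h3 h4 h5
    · rfl
    · exact absurd ⟨h1.1, by omega, h1.2.2⟩ h2'
    · rfl
    · exfalso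
      have hk1 : k + 1 = 2 ^ m := by omega
      exact h4 ⟨(is_power_of_two_iff (k + 1)).mpr ⟨m, hk1⟩, by omega, by omega⟩
    · exfalso
      have hni : ¬ (2 ^ (m + 1) ≤ k + 1) := fun hA => h1 ⟨h5.1, hA, h5.2.2⟩
      obtain ⟨e, he⟩ := (is_power_of_two_iff (k + 1)).mp h5.1
      have he2 : e = m := pow2_interval (he ▸ h5.2.1) (by omega)
      rw [he2] at he
      exact h3 (by omega)
    · rfl
  · rename_i hlt
    split
    · rename_i hc; omega
    · rfl

-- ===== VERDICT (by name: the statement is the Claim_ definition above) =====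
theorem clear_places_spec : Claim_equal_clear_places := by
  intro l _
  unfold Spec_clear_places clear_places clear_places_alt
  apply List.ext_getElem?
  intro k
  have hA := clearLoopA_get (l.length - 1) l 1 k rfl (by omega)
  have hB := clearLoopB_get (l.length - 2 ^ 0) l 0 k (by norm_num) rfl
  rw [hA]
  exact hB.symm
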